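-- pv_equiv track=rewrite | github.com/abin7-alpha/Ecommerce | commodity/functions.py | get_moq
-- ===== SOURCE A (Python) =====
-- def get_moq(available_qty):
-- 	dividents_with_remainder_zero = []
--
-- 	if available_qty > 100:
-- 		if available_qty % 10 == 0:
-- 			return 10
-- 		elif available_qty % 5 == 0:
-- 			return 5
-- 		elif available_qty % 2 == 0:
-- 			return 2
-- 		return 1
-- 	elif available_qty == 2:
-- 		return 2
-- 	elif available_qty == 3:
-- 		return 3
-- 	elif available_qty == 1:
-- 		return 1
-- 	else:
-- 		for number in range(1, available_qty):
-- 			if available_qty % number == 0: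
-- 				dividents_with_remainder_zero.append(number)
--
-- 		if len(dividents_with_remainder_zero) == 2:
-- 			return dividents_with_remainder_zero[0]
-- 		elif len(dividents_with_remainder_zero) == 3:
-- 			return dividents_with_remainder_zero[1]
-- 		elif len(dividents_with_remainder_zero) == 4:
-- 			return dividents_with_remainder_zero[2]
-- 		elif len(dividents_with_remainder_zero) == 5:
-- 			return dividents_with_remainder_zero[3]
-- 		else:
-- 			return 1
-- ===== SOURCE B (Python) =====
-- def get_moq(available_qty):
--     n = available_qty
--     if n > 100:
--         if n % 10 == 0:
--             return 10
--         if n % 5 == 0: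
--             return 5
--         if n % 2 == 0:
--             return 2
--         return 1
--     if n == 2 or n == 3:
--         return n
--     if n == 1:
--         return 1
--     # proper divisors of n via sqrt pairing, ascending
--     divs = []
--     i = 1
--     while i * i <= n:
--         if n % i == 0:
--             divs.append(i)
--             j = n // i
--             if j != i and j != n:
--                 divs.append(j)
--         i += 1
--     divs.sort()
--     k = len(divs)
--     return divs[k - 2] if 2 <= k <= 5 else 1
-- ===== Notes on version B (the rewrite author's own statement) =====
-- stated objective: alternative
-- what changed: The small-quantity branch builds the proper-divisor list with a sqrt-pairing loop (i*i <= n, adding i and its cofactor, then sorting) instead of A's full 1..n-1 trial-division scan, and the four length cases collapse into one index formula divs[k-2].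
import Mathlib
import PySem

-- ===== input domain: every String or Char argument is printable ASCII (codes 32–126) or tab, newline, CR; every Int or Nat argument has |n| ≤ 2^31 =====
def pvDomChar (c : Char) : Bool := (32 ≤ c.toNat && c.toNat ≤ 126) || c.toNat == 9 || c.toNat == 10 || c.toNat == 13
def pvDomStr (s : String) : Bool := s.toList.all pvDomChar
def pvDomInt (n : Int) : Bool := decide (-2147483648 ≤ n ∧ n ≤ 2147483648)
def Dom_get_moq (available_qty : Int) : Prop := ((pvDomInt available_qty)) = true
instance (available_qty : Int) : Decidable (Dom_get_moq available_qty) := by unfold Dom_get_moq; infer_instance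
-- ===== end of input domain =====

-- B replaces A's O(n) trial-division scan by a √n divisor-pairing loop plus sort and
-- collapses the four count cases into one index formula (objective: alternative).

-- ===== PORT A =====
def get_moq (available_qty : Int) : Int :=
  if available_qty > 100 then
    if PySem.Int.mod available_qty 10 == 0 then 10
    else if PySem.Int.mod available_qty 5 == 0 then 5
    else if PySem.Int.mod available_qty 2 == 0 then 2
    else 1
  else if available_qty == 2 then 2
  else if available_qty == 3 then 3
  else if available_qty == 1 then 1
  else
    let ds := (PySem.List.pyRange 1 available_qty 1).foldl
      (fun acc number => if PySem.Int.mod available_qty number == 0 then acc ++ [number] else acc) []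
    if ds.length == 2 then (PySem.List.pyGet? ds 0).getD 0
    else if ds.length == 3 then (PySem.List.pyGet? ds 1).getD 0
    else if ds.length == 4 then (PySem.List.pyGet? ds 2).getD 0
    else if ds.length == 5 then (PySem.List.pyGet? ds 3).getD 0
    else 1

-- ===== PORT B =====
-- the while-loop of Source B (fuel bounds the iteration count; n.toNat+1 suffices since i ≤ n while running)
def get_moq_alt_loop : Nat → Int → Int → List Int → List Int
  | 0, _, _, acc => acc
  | fuel + 1, n, i, acc =>
    if i * i ≤ n then
      get_moq_alt_loop fuel n (i + 1)
        (if PySem.Int.mod n i == 0 then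
          (acc ++ [i]) ++ (if PySem.Int.floordiv n i ≠ i ∧ PySem.Int.floordiv n i ≠ n
                            then [PySem.Int.floordiv n i] else [])
         else acc)
    else acc

def get_moq_alt (available_qty : Int) : Int :=
  if available_qty > 100 then
    if PySem.Int.mod available_qty 10 == 0 then 10
    else if PySem.Int.mod available_qty 5 == 0 then 5
    else if PySem.Int.mod available_qty 2 == 0 then 2
    else 1
  else if available_qty == 2 || available_qty == 3 then available_qty
  else if available_qty == 1 then 1
  else
    let divs := PySem.List.sorted (get_moq_alt_loop (available_qty.toNat + 1) available_qty 1 []) (fun x => x) false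
    let k : Int := PySem.List.len divs
    if 2 ≤ k ∧ k ≤ 5 then (PySem.List.pyGet? divs (k - 2)).getD 0 else 1

-- ===== PRECONDITION & SPEC =====
def Spec_get_moq (available_qty : Int) (out : Int) : Prop := out = get_moq_alt available_qty
instance (available_qty : Int) (out : Int) : Decidable (Spec_get_moq available_qty out) := by unfold Spec_get_moq; infer_instance

-- ===== CLAIM (what is proved, stated in full; the proofs are below) =====
def Claim_equal_get_moq : Prop := ∀ (available_qty : Int), Dom_get_moq available_qty → Spec_get_moq available_qty (get_moq available_qty)

-- ===== LEMMAS AND PROOFS =====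

-- For n ≤ 0 both programs fall to the else branch with an empty divisor list and return 1.
lemma get_moq_nonpos (n : Int) (hn : n ≤ 0) : get_moq n = 1 := by
  unfold get_moq
  have h1 : ¬ n > 100 := by omega
  have h2 : n ≠ 2 := by omega
  have h3 : n ≠ 3 := by omega
  have h4 : n ≠ 1 := by omega
  have hr : PySem.List.pyRange 1 n 1 = [] := by
    simp [PySem.List.pyRange]; omega
  simp [h1, h2, h3, h4, hr]

lemma get_moq_alt_nonpos (n : Int) (hn : n ≤ 0) : get_moq_alt n = 1 := by
  unfold get_moq_alt
  have h1 : ¬ n > 100 := by omega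
  have h2 : ¬ (n = 2 ∨ n = 3) := by omega
  have h4 : n ≠ 1 := by omega
  have hl : get_moq_alt_loop (n.toNat + 1) n 1 [] = [] := by
    have h0 : n.toNat = 0 := by omega
    rw [h0]
    unfold get_moq_alt_loop
    have : ¬ ((1:Int) ≤ n) := by omega
    simp [this]
  simp only [hl]
  simp [h1, h2, h4, PySem.List.sorted, PySem.List.len]

-- ===== VERDICT (by name: the statement is the Claim_ definition above) =====
theorem get_moq_spec : Claim_equal_get_moq := by
  intro n _
  unfold Spec_get_moq
  by_cases hb : n > 100
  · unfold get_moq get_moq_alt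
    simp [hb]
  · by_cases hp : n ≤ 0
    · rw [get_moq_nonpos n hp, get_moq_alt_nonpos n hp]
    · -- 1 ≤ n ≤ 100: finitely many cases
      have h1 : 1 ≤ n := by omega
      have h2 : n ≤ 100 := by omega
      interval_cases n <;> decide
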